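-- pv_equiv track=rewrite | github.com/barneyb/aoc-2023 | python/aoc2019/day08/space_image_format.py | parse
-- ===== SOURCE A (Python) =====
-- def parse(input, width=25, height=6):
--     size = width * height
--     layers = []
--     layer = None
--     row = None
--     for i, c in enumerate(input):
--         if i % width == 0:
--             if i % size == 0:
--                 layer = []
--                 layers.append(layer)
--             row = []
--             layer.append(row)
--         row.append(int(c))
--     return layers
-- ===== SOURCE B (Python) =====
-- def parse(input, width=25, height=6):
--     if not input:
--         return []
--     size = width * height
--     layers = []
--     for i in range(0, len(input), size):
--         chunk = input[i:i + size]
--         layers.append([[int(c) for c in chunk[j:j + width]]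
--                        for j in range(0, len(chunk), width)])
--     return layers
-- ===== Notes on version B (the rewrite author's own statement) =====
-- stated objective: simpler
-- what changed: B slices the input into width*height-sized layer chunks and width-sized row slices (range with a stride + slicing), replacing A's single character-by-character loop that maintains aliased layer/row accumulators keyed on i%width and i%size tests.
-- outside the precondition, e.g. on parse('00', -1, 1): A returns [[[0]], [[0]]], B returns []; on parse('1234', -2, -3): A returns [[[1, 2], [3, 4]]], B returns [[]]
import Mathlib
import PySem

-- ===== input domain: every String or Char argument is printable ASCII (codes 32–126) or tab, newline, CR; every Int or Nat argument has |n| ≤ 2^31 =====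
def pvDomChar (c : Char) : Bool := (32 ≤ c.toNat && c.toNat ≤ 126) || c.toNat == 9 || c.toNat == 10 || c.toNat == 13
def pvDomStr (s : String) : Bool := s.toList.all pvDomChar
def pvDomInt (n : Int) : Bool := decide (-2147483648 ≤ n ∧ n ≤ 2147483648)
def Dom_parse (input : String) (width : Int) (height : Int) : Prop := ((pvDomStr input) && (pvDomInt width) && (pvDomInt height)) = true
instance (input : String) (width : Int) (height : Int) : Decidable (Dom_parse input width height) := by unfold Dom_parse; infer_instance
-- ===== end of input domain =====

-- B re-chunks the input by slicing (layers of size width*height, rows of width) instead of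
-- A's single character loop with i%width / i%size boundary tests; simpler decomposition, same cost.

-- ===== PORT A =====
-- int(c) for a one-character string; Pre_ restricts to digits, where ofStr? is exact
def pyIntC (c : Char) : Int := (PySem.Int.ofStr? (String.singleton c)).getD 0

-- models Python's in-place append through the alias held in `layer`/`row`: the alias is
-- always the MOST RECENTLY appended element, i.e. the last one
def modifyLast {α : Type} (f : α → α) : List α → List α
  | [] => []
  | [x] => [f x]
  | x :: y :: xs => x :: modifyLast f (y :: xs)

-- the body of A's for-loop, one character at index i
def parseStep (width size : Int) (ls : List (List (List Int))) (i : Int) (c : Char) :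
    List (List (List Int)) :=
  let ls1 :=
    if PySem.Int.mod i width = 0 then
      let ls0 := if PySem.Int.mod i size = 0 then ls ++ [[]] else ls
      modifyLast (fun layer => layer ++ [([] : List Int)]) ls0
    else ls
  modifyLast (fun layer => modifyLast (fun row => row ++ [pyIntC c]) layer) ls1

def parse (input : String) (width : Int) (height : Int) : List (List (List Int)) :=
  let size := width * height
  (PySem.List.enumerate input.toList 0).foldl
    (fun ls ic => parseStep width size ls ic.1 ic.2) []

-- ===== PORT B =====
def parse_alt (input : String) (width : Int) (height : Int) : List (List (List Int)) :=
  if input = "" then []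
  else
    let cs := input.toList
    let size := width * height
    (PySem.List.pyRange 0 (cs.length : Int) size).foldl
      (fun layers i =>
        let chunk := PySem.List.slice cs (some i) (some (i + size))
        layers ++
          [(PySem.List.pyRange 0 (chunk.length : Int) width).map
            (fun j => (PySem.List.slice chunk (some j) (some (j + width))).map pyIntC)])
      []

-- ===== PRECONDITION & SPEC =====
-- Pre_ excludes (a) nonempty inputs containing a non-digit character, and inputs whose first
-- character is reached with width = 0 or width*height = 0, on which A raises (ValueError /
-- ZeroDivisionError), and (b) nonempty inputs with a negative width or height, where A's
-- modulo-based boundary test accidentally chunks by the absolute values — an artefact of the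
-- implementation on inputs outside the function's purpose (image dimensions).
def Pre_parse (input : String) (width : Int) (height : Int) : Prop :=
  input = "" ∨ (0 < width ∧ 0 < height ∧ input.toList.all Char.isDigit = true)
instance (input : String) (width : Int) (height : Int) : Decidable (Pre_parse input width height) := by
  unfold Pre_parse; infer_instance

def pvWitness_parse : String × Int × Int := ("123456789012", 3, 2)

def Spec_parse (input : String) (width : Int) (height : Int) (out : List (List (List Int))) : Prop :=
  out = parse_alt input width height
instance (input : String) (width : Int) (height : Int) (out : List (List (List Int))) : Decidable (Spec_parse input width height out) := by
  unfold Spec_parse; infer_instance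

-- ===== CLAIM (what is proved, stated in full; the proofs are below) =====
def Claim_equal_parse : Prop := ∀ (input : String) (width : Int) (height : Int),
  Dom_parse input width height → Pre_parse input width height →
  Spec_parse input width height (parse input width height)

-- ===== LEMMAS AND PROOFS =====

-- chunks k xs : xs cut into pieces of length k+1 (last piece possibly shorter)
def chunks {α : Type} (k : Nat) : List α → List (List α)
  | [] => []
  | x :: xs => ((x :: xs).take (k + 1)) :: chunks k ((x :: xs).drop (k + 1))
termination_by xs => xs.length
decreasing_by simp [List.drop_succ_cons]

def rowsOf (W : Nat) (L : List Char) : List (List Int) :=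
  (chunks (W - 1) L).map (List.map pyIntC)

def specOf (W S : Nat) (cs : List Char) : List (List (List Int)) :=
  (chunks (S - 1) cs).map (rowsOf W)

theorem modifyLast_append_singleton {α : Type} (f : α → α) (xs : List α) (x : α) :
    modifyLast f (xs ++ [x]) = xs ++ [f x] := by
  induction xs with
  | nil => simp [modifyLast]
  | cons a as ih =>
    cases as with
    | nil => simp [modifyLast]
    | cons b bs => simpa [modifyLast] using ih

theorem modifyLast_cons_of_ne_nil {α : Type} (f : α → α) (x : α) {xs : List α} (h : xs ≠ []) :
    modifyLast f (x :: xs) = x :: modifyLast f xs := by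
  cases xs with
  | nil => exact absurd rfl h
  | cons b bs => rfl

theorem map_modifyLast {α β : Type} (f : α → β) (g : α → α) (g' : β → β)
    (h : ∀ a, f (g a) = g' (f a)) (l : List α) :
    (modifyLast g l).map f = modifyLast g' (l.map f) := by
  induction l with
  | nil => rfl
  | cons a as ih =>
    cases as with
    | nil => simp [modifyLast, h]
    | cons b bs => simpa [modifyLast] using ih

theorem modifyLast_ne_nil {α : Type} (f : α → α) {l : List α} (h : l ≠ []) :
    modifyLast f l ≠ [] := by
  cases l with
  | nil => exact absurd rfl h
  | cons a as => cases as <;> simp [modifyLast]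

theorem chunks_ne_nil {α : Type} (k : Nat) {l : List α} (h : l ≠ []) : chunks k l ≠ [] := by
  cases l with
  | nil => exact absurd rfl h
  | cons a as => rw [chunks]; simp

theorem chunks_of_length_le {α : Type} (k : Nat) {l : List α} (h : l ≠ [])
    (hlen : l.length ≤ k + 1) : chunks k l = [l] := by
  cases l with
  | nil => exact absurd rfl h
  | cons a as =>
    rw [chunks]
    rw [List.take_of_length_le hlen, List.drop_of_length_le hlen]
    rw [chunks]

theorem chunks_snoc_dvd_aux {α : Type} (k : Nat) :
    ∀ (n : Nat) (p : List α) (c : α), p.length ≤ n → (k + 1) ∣ p.length →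
      chunks k (p ++ [c]) = chunks k p ++ [[c]] := by
  intro n
  induction n with
  | zero =>
    intro p c hle _
    have hp : p = [] := List.eq_nil_of_length_eq_zero (Nat.le_zero.mp hle)
    subst hp
    rw [List.nil_append, chunks]
    simp [chunks]
  | succ n ih =>
    intro p c hle hdvd
    cases p with
    | nil =>
      rw [List.nil_append, chunks]
      simp [chunks]
    | cons x xs =>
      by_cases hlen : k + 1 ≤ (x :: xs).length
      · have e1 : (x :: xs) ++ [c] = x :: (xs ++ [c]) := by simp
        rw [e1, chunks, chunks]
        rw [show x :: (xs ++ [c]) = (x :: xs) ++ [c] by simp]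
        rw [List.take_append_of_le_length hlen, List.drop_append_of_le_length hlen]
        rw [ih ((x :: xs).drop (k + 1)) c
          (by simp at hle ⊢; omega)
          (by rw [List.length_drop]; exact Nat.dvd_sub hdvd dvd_rfl)]
        simp
      · exfalso
        have h0 : 0 < (x :: xs).length := by simp
        exact hlen (Nat.le_of_dvd h0 hdvd)

theorem chunks_snoc_dvd {α : Type} (k : Nat) (p : List α) (c : α)
    (h : (k + 1) ∣ p.length) : chunks k (p ++ [c]) = chunks k p ++ [[c]] :=
  chunks_snoc_dvd_aux k p.length p c le_rfl h

theorem chunks_snoc_not_dvd_aux {α : Type} (k : Nat) :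
    ∀ (n : Nat) (p : List α) (c : α), p.length ≤ n → ¬ (k + 1) ∣ p.length →
      chunks k (p ++ [c]) = modifyLast (· ++ [c]) (chunks k p) := by
  intro n
  induction n with
  | zero =>
    intro p c hle hdvd
    have hp : p = [] := List.eq_nil_of_length_eq_zero (Nat.le_zero.mp hle)
    subst hp
    simp at hdvd
  | succ n ih =>
    intro p c hle hdvd
    cases p with
    | nil => simp at hdvd
    | cons x xs =>
      by_cases hlen : k + 1 ≤ (x :: xs).length
      · have e1 : (x :: xs) ++ [c] = x :: (xs ++ [c]) := by simp
        rw [e1, chunks, chunks]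
        rw [show x :: (xs ++ [c]) = (x :: xs) ++ [c] by simp]
        rw [List.take_append_of_le_length hlen, List.drop_append_of_le_length hlen]
        have hdvd' : ¬ (k + 1) ∣ ((x :: xs).drop (k + 1)).length := by
          rw [List.length_drop]
          intro hd
          have h2 : k + 1 ∣ ((x :: xs).length - (k + 1)) + (k + 1) := Nat.dvd_add hd dvd_rfl
          rw [Nat.sub_add_cancel hlen] at h2
          exact hdvd h2
        rw [ih ((x :: xs).drop (k + 1)) c (by simp at hle ⊢; omega) hdvd']
        have hne : (x :: xs).drop (k + 1) ≠ [] := by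
          intro he
          have h3 := congrArg List.length he
          simp [List.length_drop] at h3
          have h4 : (x :: xs).length = k + 1 := by simp at h3 hlen ⊢; omega
          exact hdvd (h4 ▸ dvd_rfl)
        rw [modifyLast_cons_of_ne_nil _ _ (chunks_ne_nil k hne)]
      · have hlt : (x :: xs).length ≤ k := by simp at hlen ⊢; omega
        rw [chunks_of_length_le k (show (x :: xs) ++ [c] ≠ [] by simp) (by simp at hlt ⊢; omega),
            chunks_of_length_le k (by simp) (by omega)]
        simp [modifyLast]

theorem chunks_snoc_not_dvd {α : Type} (k : Nat) (p : List α) (c : α)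
    (h : ¬ (k + 1) ∣ p.length) :
    chunks k (p ++ [c]) = modifyLast (· ++ [c]) (chunks k p) :=
  chunks_snoc_not_dvd_aux k p.length p c le_rfl h

theorem rowsOf_snoc_dvd (W : Nat) (hW : 0 < W) (L : List Char) (c : Char)
    (h : W ∣ L.length) : rowsOf W (L ++ [c]) = rowsOf W L ++ [[pyIntC c]] := by
  unfold rowsOf
  rw [chunks_snoc_dvd (W - 1) L c (by rwa [Nat.sub_add_cancel hW])]
  simp

theorem rowsOf_snoc_not_dvd (W : Nat) (hW : 0 < W) (L : List Char) (c : Char)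
    (h : ¬ W ∣ L.length) :
    rowsOf W (L ++ [c]) = modifyLast (· ++ [pyIntC c]) (rowsOf W L) := by
  unfold rowsOf
  rw [chunks_snoc_not_dvd (W - 1) L c (by rwa [Nat.sub_add_cancel hW])]
  exact map_modifyLast _ _ _ (fun a => by simp) _

theorem chunks_nil {α : Type} (k : Nat) : chunks k ([] : List α) = [] := by
  rw [chunks]

theorem specOf_nil (W S : Nat) : specOf W S [] = [] := by
  simp [specOf, chunks_nil]

theorem specOf_eq_nil_iff (W S : Nat) (l : List Char) : specOf W S l = [] ↔ l = [] := by
  unfold specOf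
  rw [List.map_eq_nil_iff]
  constructor
  · intro h
    by_contra hne
    exact chunks_ne_nil _ hne h
  · intro h; subst h; exact chunks_nil _

theorem specOf_cons (W S : Nat) (hS : 0 < S) {l : List Char} (h : l ≠ []) :
    specOf W S l = rowsOf W (l.take S) :: specOf W S (l.drop S) := by
  cases l with
  | nil => exact absurd rfl h
  | cons x xs =>
    unfold specOf
    rw [chunks, Nat.sub_add_cancel hS]
    rfl

theorem mod_cast_eq_zero_iff {d : Int} (hd : 0 < d) (n : Nat) :
    (PySem.Int.mod (n : Int) d = 0) ↔ d.toNat ∣ n := by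
  rw [PySem.Int.mod_eq_zero_iff_dvd,
    show d = ((d.toNat : Nat) : Int) from (Int.toNat_of_nonneg hd.le).symm]
  exact Int.natCast_dvd_natCast

theorem mod_sub_self (a b : Int) (hb : 0 < b) :
    PySem.Int.mod (a - b) b = PySem.Int.mod a b := by
  rw [PySem.Int.mod_eq_emod_of_pos hb, PySem.Int.mod_eq_emod_of_pos hb]
  simp

theorem mod_sub_dvd (a b s : Int) (hb : 0 < b) (h : b ∣ s) :
    PySem.Int.mod (a - s) b = PySem.Int.mod a b := by
  rw [PySem.Int.mod_eq_emod_of_pos hb, PySem.Int.mod_eq_emod_of_pos hb]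
  rw [Int.sub_emod, Int.emod_eq_zero_of_dvd h]
  simp [Int.emod_emod_of_dvd]

theorem parseStep_congr (width s : Int) (ls : List (List (List Int))) (i i' : Int) (c : Char)
    (h1 : PySem.Int.mod i width = PySem.Int.mod i' width)
    (h2 : PySem.Int.mod i s = PySem.Int.mod i' s) :
    parseStep width s ls i c = parseStep width s ls i' c := by
  unfold parseStep
  rw [h1, h2]

theorem parseStep_cons (width s : Int) (hdvd : width ∣ s)
    (L : List (List Int)) (ls : List (List (List Int))) (i : Int) (c : Char)
    (h : ls = [] → PySem.Int.mod i s = 0) :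
    parseStep width s (L :: ls) i c = L :: parseStep width s ls i c := by
  by_cases h1 : PySem.Int.mod i s = 0
  · have h2 : PySem.Int.mod i width = 0 := by
      rw [PySem.Int.mod_eq_zero_iff_dvd] at h1 ⊢
      exact dvd_trans hdvd h1
    simp only [parseStep, if_pos h1, if_pos h2]
    rw [show (L :: ls) ++ [([] : List (List Int))] = L :: (ls ++ [[]]) from rfl]
    rw [modifyLast_cons_of_ne_nil _ _ (by simp : ls ++ [([] : List (List Int))] ≠ [])]
    rw [modifyLast_cons_of_ne_nil _ _ (modifyLast_ne_nil _ (by simp))]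
  · have hls : ls ≠ [] := fun he => h1 (h he)
    by_cases h2 : PySem.Int.mod i width = 0
    · simp only [parseStep, if_pos h2, if_neg h1]
      rw [modifyLast_cons_of_ne_nil _ _ hls,
        modifyLast_cons_of_ne_nil _ _ (modifyLast_ne_nil _ hls)]
    · simp only [parseStep, if_neg h2]
      rw [modifyLast_cons_of_ne_nil _ _ hls]

theorem rowsOf_singleton (W : Nat) (c : Char) : rowsOf W [c] = [[pyIntC c]] := by
  unfold rowsOf
  rw [chunks_of_length_le _ (by simp) (by simp only [List.length_singleton]; omega)]
  rfl

theorem specOf_singleton (W S : Nat) (c : Char) :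
    specOf W S [c] = [[[pyIntC c]]] := by
  unfold specOf
  rw [chunks_of_length_le _ (by simp) (by simp only [List.length_singleton]; omega)]
  simp only [List.map_cons, List.map_nil]
  rw [rowsOf_singleton W c]

theorem step_spec_nil (width height : Int) (hw : 0 < width) (hh : 0 < height) (c : Char) :
    parseStep width (width * height) [] 0 c
      = specOf width.toNat (width * height).toNat [c] := by
  have hs : 0 < width * height := mul_pos hw hh
  have hS : 0 < (width * height).toNat := by omega
  have hW : 0 < width.toNat := by omega
  rw [specOf_singleton _ _ c]
  have h0w : PySem.Int.mod 0 width = 0 := (PySem.Int.mod_eq_zero_iff_dvd _ _).mpr (dvd_zero _)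
  have h0s : PySem.Int.mod 0 (width * height) = 0 :=
    (PySem.Int.mod_eq_zero_iff_dvd _ _).mpr (dvd_zero _)
  simp only [parseStep, if_pos h0w, if_pos h0s]
  simp [modifyLast]

theorem step_spec_aux (width height : Int) (hw : 0 < width) (hh : 0 < height) :
    ∀ (n : Nat) (p : List Char) (c : Char), p.length ≤ n →
    parseStep width (width * height) (specOf width.toNat (width * height).toNat p)
      (p.length : Int) c = specOf width.toNat (width * height).toNat (p ++ [c]) := by
  have hs : 0 < width * height := mul_pos hw hh
  have hS : 0 < (width * height).toNat := by omega
  have hW : 0 < width.toNat := by omega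
  have hWS : width.toNat ∣ (width * height).toNat := by
    have hcast : ((width.toNat * height.toNat : Nat) : Int) = width * height := by
      rw [Nat.cast_mul, Int.toNat_of_nonneg hw.le, Int.toNat_of_nonneg hh.le]
    exact ⟨height.toNat, by rw [← hcast, Int.toNat_natCast]⟩
  intro n
  induction n with
  | zero =>
    intro p c hle
    have hp : p = [] := List.eq_nil_of_length_eq_zero (Nat.le_zero.mp hle)
    subst hp
    rw [specOf_nil]
    simpa using step_spec_nil width height hw hh c
  | succ n ih =>
    intro p c hle
    by_cases hp : p = []
    · subst hp
      rw [specOf_nil]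
      simpa using step_spec_nil width height hw hh c
    · by_cases hsp : (width * height).toNat ≤ p.length
      · -- at least one full layer in front; peel it off and recurse
        rw [specOf_cons _ _ hS hp]
        have hRHS : specOf width.toNat (width * height).toNat (p ++ [c])
            = rowsOf width.toNat (p.take (width * height).toNat)
              :: specOf width.toNat (width * height).toNat
                  (p.drop (width * height).toNat ++ [c]) := by
          rw [specOf_cons _ _ hS (by simp),
            List.take_append_of_le_length hsp, List.drop_append_of_le_length hsp]
        rw [hRHS]
        have hcond : specOf width.toNat (width * height).toNat
            (p.drop (width * height).toNat) = [] →
            PySem.Int.mod (p.length : Int) (width * height) = 0 := by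
          intro htail
          have hdr : p.drop (width * height).toNat = [] :=
            (specOf_eq_nil_iff _ _ _).mp htail
          have hlen : p.length = (width * height).toNat := by
            have := congrArg List.length hdr
            simp [List.length_drop] at this
            omega
          rw [(mod_cast_eq_zero_iff hs p.length)]
          exact hlen ▸ dvd_rfl
        rw [parseStep_cons width (width * height) ⟨height, rfl⟩ _ _ _ _ hcond]
        congr 1
        have ihs := ih (p.drop (width * height).toNat) c
          (by simp [List.length_drop]; omega)
        rw [← ihs]
        apply parseStep_congr
        · have hlen : (((p.drop (width * height).toNat).length : Nat) : Int)
              = (p.length : Int) - width * height := by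
            rw [List.length_drop,
              show (width * height) = (((width * height).toNat : Nat) : Int)
                from (Int.toNat_of_nonneg hs.le).symm]
            exact Nat.cast_sub hsp
          rw [hlen, mod_sub_dvd _ _ _ hw ⟨height, rfl⟩]
        · have hlen : (((p.drop (width * height).toNat).length : Nat) : Int)
              = (p.length : Int) - width * height := by
            rw [List.length_drop,
              show (width * height) = (((width * height).toNat : Nat) : Int)
                from (Int.toNat_of_nonneg hs.le).symm]
            exact Nat.cast_sub hsp
          rw [hlen, mod_sub_self _ _ hs]
      · -- a single (partial) layer
        have hlt : p.length < (width * height).toNat := by omega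
        have hp0 : 0 < p.length := List.length_pos_of_ne_nil hp
        have hspec : specOf width.toNat (width * height).toNat p
            = [rowsOf width.toNat p] := by
          unfold specOf
          rw [chunks_of_length_le _ hp (by omega)]
          rfl
        have hspec' : specOf width.toNat (width * height).toNat (p ++ [c])
            = [rowsOf width.toNat (p ++ [c])] := by
          unfold specOf
          rw [chunks_of_length_le _ (by simp)
            (by simp only [List.length_append, List.length_singleton]; omega)]
          rfl
        have hnS : ¬ PySem.Int.mod (p.length : Int) (width * height) = 0 := by
          rw [mod_cast_eq_zero_iff hs]
          intro hd
          have := Nat.le_of_dvd hp0 hd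
          omega
        rw [hspec, hspec']
        by_cases hWd : width.toNat ∣ p.length
        · simp only [parseStep, if_pos ((mod_cast_eq_zero_iff hw _).mpr hWd), if_neg hnS]
          simp only [modifyLast]
          rw [modifyLast_append_singleton]
          rw [rowsOf_snoc_dvd _ hW _ _ hWd]
          simp
        · simp only [parseStep,
            if_neg (fun h => hWd ((mod_cast_eq_zero_iff hw _).mp h))]
          simp only [modifyLast]
          rw [rowsOf_snoc_not_dvd _ hW _ _ hWd]

theorem step_spec (width height : Int) (hw : 0 < width) (hh : 0 < height)
    (p : List Char) (c : Char) :
    parseStep width (width * height) (specOf width.toNat (width * height).toNat p)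
      (p.length : Int) c = specOf width.toNat (width * height).toNat (p ++ [c]) :=
  step_spec_aux width height hw hh p.length p c le_rfl

theorem foldA (width height : Int) (hw : 0 < width) (hh : 0 < height) :
    ∀ (cs p : List Char),
      (PySem.List.enumerate cs (p.length : Int)).foldl
        (fun ls ic => parseStep width (width * height) ls ic.1 ic.2)
        (specOf width.toNat (width * height).toNat p)
      = specOf width.toNat (width * height).toNat (p ++ cs) := by
  intro cs
  induction cs with
  | nil => intro p; simp [PySem.List.enumerate]
  | cons c cs ih =>
    intro p
    rw [PySem.List.enumerate_cons, List.foldl_cons]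
    have h1 := step_spec width height hw hh p c
    have h2 := ih (p ++ [c])
    simp only [List.length_append, List.length_singleton] at h2
    push_cast at h2 ⊢
    rw [h1]
    rw [show ((p.length : Int) + 1) = (((p ++ [c]).length : Nat) : Int) by simp]
    simpa using h2

theorem chunks_cons_of_ne_nil {α : Type} (k : Nat) {l : List α} (h : l ≠ []) :
    chunks k l = l.take (k + 1) :: chunks k (l.drop (k + 1)) := by
  cases l with
  | nil => exact absurd rfl h
  | cons x xs => rw [chunks]

theorem pyRange_pos_nil (a b K : Int) (hab : b ≤ a) (hK : 0 < K) :
    PySem.List.pyRange a b K = [] := by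
  rw [PySem.List.pyRange_of_pos _ _ hK, if_neg (not_lt.mpr hab)]
  simp

theorem pyRange_pos_cons (a b K : Int) (hab : a < b) (hK : 0 < K) :
    PySem.List.pyRange a b K = a :: PySem.List.pyRange (a + K) b K := by
  rw [PySem.List.pyRange_of_pos _ _ hK, PySem.List.pyRange_of_pos _ _ hK, if_pos hab]
  by_cases h2 : a + K < b
  · rw [if_pos h2]
    have hcount : ((b - a + K - 1) / K).toNat = ((b - (a + K) + K - 1) / K).toNat + 1 := by
      have h3 : (b - a + K - 1) / K = (b - (a + K) + K - 1) / K + 1 := by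
        rw [show b - a + K - 1 = (b - (a + K) + K - 1) + 1 * K by ring,
          Int.add_mul_ediv_right _ _ (ne_of_gt hK)]
      have hnn : 0 ≤ (b - (a + K) + K - 1) / K := Int.ediv_nonneg (by omega) hK.le
      omega
    rw [hcount, List.range_succ_eq_map, List.map_cons, List.map_map]
    refine congrArg₂ List.cons (by push_cast; ring) ?_
    refine List.map_congr_left (fun x _ => ?_)
    simp only [Function.comp_apply, Nat.succ_eq_add_one]
    push_cast
    ring
  · rw [if_neg h2]
    have hone : (b - a + K - 1) / K = 1 := by
      rw [← PySem.Int.floordiv_eq_ediv_of_pos hK]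
      exact (PySem.Int.floordiv_eq_iff_of_pos hK).mpr ⟨by omega, by omega⟩
    rw [hone]
    simp

theorem map_pyRange_slice {β : Type} (K : Int) (hK : 0 < K) (cs : List Char)
    (f : List Char → β) :
    ∀ (n d : Nat), cs.length - d ≤ n →
      (PySem.List.pyRange (d : Int) (cs.length : Int) K).map
          (fun i => f (PySem.List.slice cs (some i) (some (i + K))))
        = (chunks (K.toNat - 1) (cs.drop d)).map f := by
  intro n
  induction n with
  | zero =>
    intro d h
    have hfull : cs.length ≤ d := by omega
    rw [pyRange_pos_nil _ _ _ (by exact_mod_cast hfull) hK,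
      List.drop_of_length_le hfull, chunks_nil]
    simp
  | succ n ih =>
    intro d h
    by_cases hd : cs.length ≤ d
    · rw [pyRange_pos_nil _ _ _ (by exact_mod_cast hd) hK,
        List.drop_of_length_le hd, chunks_nil]
      simp
    · have hdlt : d < cs.length := by omega
      rw [pyRange_pos_cons _ _ _ (by exact_mod_cast hdlt) hK, List.map_cons]
      have hKt : K.toNat - 1 + 1 = K.toNat := by omega
      have hslice : PySem.List.slice cs (some (d : Int)) (some ((d : Int) + K))
          = (cs.drop d).take K.toNat := by
        rw [PySem.List.slice_toNat cs (by omega) (by omega)]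
        congr 1
        omega
      have hne : cs.drop d ≠ [] := by
        intro he
        have := congrArg List.length he
        simp at this
        omega
      rw [chunks_cons_of_ne_nil _ hne, hKt, List.map_cons, hslice]
      congr 1
      have hcast : (d : Int) + K = ((d + K.toNat : Nat) : Int) := by push_cast; omega
      rw [hcast, List.drop_drop]
      exact ih (d + K.toNat) (by omega)

theorem parse_alt_eq_spec (input : String) (width height : Int)
    (hw : 0 < width) (hh : 0 < height) :
    parse_alt input width height = specOf width.toNat (width * height).toNat input.toList := by
  by_cases hemp : input = ""
  · subst hemp
    simp [parse_alt, specOf_nil]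
  · have hs : 0 < width * height := mul_pos hw hh
    unfold parse_alt
    rw [if_neg hemp]
    rw [PySem.List.foldl_append_singleton_eq_map
      (fun i =>
        (PySem.List.pyRange 0 ((PySem.List.slice input.toList (some i)
            (some (i + width * height))).length : Int) width).map
          (fun j => (PySem.List.slice (PySem.List.slice input.toList (some i)
              (some (i + width * height))) (some j) (some (j + width))).map pyIntC))]
    rw [List.nil_append]
    have houter := map_pyRange_slice (width * height) hs input.toList
      (fun chunk => (PySem.List.pyRange 0 (chunk.length : Int) width).map
        (fun j => (PySem.List.slice chunk (some j) (some (j + width))).map pyIntC))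
      input.toList.length 0 (by omega)
    simp only [Nat.cast_zero, List.drop_zero] at houter
    rw [houter]
    unfold specOf
    refine List.map_congr_left (fun chunk _ => ?_)
    have hinner := map_pyRange_slice width hw chunk (List.map pyIntC)
      chunk.length 0 (by omega)
    simp only [Nat.cast_zero, List.drop_zero] at hinner
    exact hinner

theorem parse_eq_spec (input : String) (width height : Int)
    (hw : 0 < width) (hh : 0 < height) :
    parse input width height = specOf width.toNat (width * height).toNat input.toList := by
  have h := foldA width height hw hh input.toList []
  have hnil : specOf width.toNat (width * height).toNat [] = [] := by
    simp [specOf, chunks]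
  rw [hnil] at h
  simpa [parse] using h

-- ===== VERDICT (by name: the statement is the Claim_ definition above) =====
theorem parse_spec : Claim_equal_parse := by
  intro input width height _ hpre
  unfold Spec_parse
  rcases hpre with h | ⟨hw, hh, _⟩
  · subst h; rfl
  · rw [parse_eq_spec input width height hw hh, parse_alt_eq_spec input width height hw hh]
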